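-- pv_equiv track=rewrite | github.com/UCI-Networking-Group/cv-inspector | cvinspector/common/webrequests_utils.py | get_content_type_mapping
-- ===== SOURCE A (Python) =====
-- def get_content_type_mapping(requests, content_type_resources):
--     mapping = {
--         "unknown": [],
--         "octet": [],
--         "json": [],
--         "js": [],
--         "media": [],
--         "html": [],
--         "css": [],
--         "xml": [],
--         "other": [],
--         "font": []
--     }
--     for webreq_url in content_type_resources:
--         url = webreq_url
--         trial_instance, web_req, content_type = content_type_resources.get(
--             webreq_url)
--         content_type = content_type.lower()
--         if url in requests:
--             # content type is optional and treat octet as unknown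
--             if content_type == "unknown" or "octet" in content_type:
--                 mapping["unknown"].append(url)
--             elif "javascript" in content_type:
--                 mapping["js"].append(url)
--             elif "html" in content_type:
--                 mapping["html"].append(url)
--             elif "xml" in content_type:
--                 mapping["xml"].append(url)
--             elif "css" in content_type:
--                 mapping["css"].append(url)
--             elif "json" in content_type:
--                 mapping["json"].append(url)
--             elif "image" in content_type:
--                 mapping["media"].append(url)
--             elif "font" in content_type:
--                 mapping["font"].append(url)
--             else:
--                 mapping["other"].append(url)
--     return mapping
-- ===== SOURCE B (Python) =====
-- RULES = (("octet", "unknown"), ("javascript", "js"), ("html", "html"),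
--          ("xml", "xml"), ("css", "css"), ("json", "json"),
--          ("image", "media"), ("font", "font"))
--
-- CATEGORIES = ("unknown", "octet", "json", "js", "media",
--               "html", "css", "xml", "other", "font")
--
--
-- def _category(c):
--     if c == "unknown":
--         return "unknown"
--     for needle, cat in RULES:
--         if needle in c:
--             return cat
--     return "other"
--
--
-- def get_content_type_mapping(requests, content_type_resources):
--     # stage 1: label each requested url with its category
--     labeled = [(url, _category(ct.lower()))
--                for url, (_trial, _webreq, ct) in content_type_resources.items()
--                if url in requests]
--     # stage 2: build each bucket by its own filtering pass (no mutable dict)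
--     return {cat: [url for url, c in labeled if c == cat]
--             for cat in CATEGORIES}
-- ===== Notes on version B (the rewrite author's own statement) =====
-- stated objective: alternative
-- what changed: B replaces A's single pass that mutates a dict of buckets through an if/elif cascade by two staged passes: first a list comprehension labels each requested url with its category, then a dict comprehension builds every bucket with its own filtering pass; no mutable mapping and no append.
import Mathlib
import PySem

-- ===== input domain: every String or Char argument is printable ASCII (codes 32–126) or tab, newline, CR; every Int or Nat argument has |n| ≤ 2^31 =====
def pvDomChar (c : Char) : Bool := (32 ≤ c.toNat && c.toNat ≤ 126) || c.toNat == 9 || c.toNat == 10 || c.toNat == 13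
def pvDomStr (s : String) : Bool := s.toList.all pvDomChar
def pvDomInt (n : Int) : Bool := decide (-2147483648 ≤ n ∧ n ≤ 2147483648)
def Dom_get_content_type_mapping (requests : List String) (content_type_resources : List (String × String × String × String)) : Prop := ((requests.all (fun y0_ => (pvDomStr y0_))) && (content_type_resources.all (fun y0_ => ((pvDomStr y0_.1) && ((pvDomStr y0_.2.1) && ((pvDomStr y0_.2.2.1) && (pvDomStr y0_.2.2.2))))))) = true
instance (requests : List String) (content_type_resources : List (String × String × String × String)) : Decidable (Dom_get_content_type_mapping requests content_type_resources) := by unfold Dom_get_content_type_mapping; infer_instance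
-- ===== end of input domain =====

-- B replaces A's single mutating pass (dict of buckets filled through an if/elif
-- cascade) by two staged passes: label each requested url with its category, then
-- build every bucket with its own filtering pass (objective: alternative decomposition).

-- ===== PORT A =====
-- the literal dict {"unknown": [], …} A starts from
def pvInitMapping : PySem.Dict String (List String) :=
  PySem.Dict.ofList [("unknown", []), ("octet", []), ("json", []), ("js", []),
    ("media", []), ("html", []), ("css", []), ("xml", []), ("other", []), ("font", [])]

def get_content_type_mapping (requests : List String) (content_type_resources : List (String × String × String × String)) : List (String × List String) :=
  let ctrDict : PySem.Dict String (String × String × String) :=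
    PySem.Dict.mk (content_type_resources.map (fun e => (e.1, e.2)))
  let mapping := content_type_resources.foldl (fun mapping webreq_url =>
    let url := webreq_url.1
    match ctrDict.get? url with
    | none => mapping  -- unreachable: url is a key of the dict
    | some v =>
      let content_type := PySem.Str.lower v.2.2
      if requests.contains url then
        if content_type == "unknown" || PySem.Str.isIn "octet" content_type then
          mapping.modify "unknown" [] (· ++ [url])
        else if PySem.Str.isIn "javascript" content_type then
          mapping.modify "js" [] (· ++ [url])
        else if PySem.Str.isIn "html" content_type then
          mapping.modify "html" [] (· ++ [url])
        else if PySem.Str.isIn "xml" content_type then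
          mapping.modify "xml" [] (· ++ [url])
        else if PySem.Str.isIn "css" content_type then
          mapping.modify "css" [] (· ++ [url])
        else if PySem.Str.isIn "json" content_type then
          mapping.modify "json" [] (· ++ [url])
        else if PySem.Str.isIn "image" content_type then
          mapping.modify "media" [] (· ++ [url])
        else if PySem.Str.isIn "font" content_type then
          mapping.modify "font" [] (· ++ [url])
        else
          mapping.modify "other" [] (· ++ [url])
      else mapping) pvInitMapping
  mapping.items

-- ===== PORT B =====
def pvRules : List (String × String) :=
  [("octet", "unknown"), ("javascript", "js"), ("html", "html"), ("xml", "xml"),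
   ("css", "css"), ("json", "json"), ("image", "media"), ("font", "font")]

def pvCategories : List String :=
  ["unknown", "octet", "json", "js", "media", "html", "css", "xml", "other", "font"]

-- B's _category: the early return on "unknown", then the for-loop over RULES
def pvCategoryLoop (c : String) : List (String × String) → String
  | [] => "other"
  | r :: rest => if PySem.Str.isIn r.1 c then r.2 else pvCategoryLoop c rest

def pvCategory (c : String) : String :=
  if c == "unknown" then "unknown" else pvCategoryLoop c pvRules

def get_content_type_mapping_alt (requests : List String) (content_type_resources : List (String × String × String × String)) : List (String × List String) :=
  -- stage 1: label each requested url with its category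
  let labeled : List (String × String) :=
    (content_type_resources.filter (fun e => requests.contains e.1)).map
      (fun e => (e.1, pvCategory (PySem.Str.lower e.2.2.2)))
  -- stage 2: one filtering pass per bucket
  pvCategories.map (fun cat => (cat, (labeled.filter (fun p => p.2 == cat)).map (·.1)))

-- ===== PRECONDITION & SPEC =====
-- Pre_ excludes association lists with duplicate keys: the Python argument is a dict,
-- which cannot carry duplicate keys (a duplicate-key list collapses before A runs).
def Pre_get_content_type_mapping (requests : List String) (content_type_resources : List (String × String × String × String)) : Prop :=
  (content_type_resources.map Prod.fst).Nodup
instance (requests : List String) (content_type_resources : List (String × String × String × String)) : Decidable (Pre_get_content_type_mapping requests content_type_resources) := by unfold Pre_get_content_type_mapping; infer_instance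

def pvWitness_get_content_type_mapping : List String × (List (String × String × String × String)) :=
  (["a", "b"], [("a", "1", "w", "text/css"), ("c", "2", "w", "unknown")])

def Spec_get_content_type_mapping (requests : List String) (content_type_resources : List (String × String × String × String)) (out : List (String × List String)) : Prop := out = get_content_type_mapping_alt requests content_type_resources
instance (requests : List String) (content_type_resources : List (String × String × String × String)) (out : List (String × List String)) : Decidable (Spec_get_content_type_mapping requests content_type_resources out) := by unfold Spec_get_content_type_mapping; infer_instance

-- ===== CLAIM (what is proved, stated in full; the proofs are below) =====
def Claim_equal_get_content_type_mapping : Prop := ∀ (requests : List String) (content_type_resources : List (String × String × String × String)), Dom_get_content_type_mapping requests content_type_resources → Pre_get_content_type_mapping requests content_type_resources → Spec_get_content_type_mapping requests content_type_resources (get_content_type_mapping requests content_type_resources)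

-- ===== LEMMAS AND PROOFS =====

-- A's if/elif cascade picks exactly the category B's _category picks.
theorem pvCategory_cases (c : String) :
    pvCategory c =
      (if c == "unknown" || PySem.Str.isIn "octet" c then "unknown"
       else if PySem.Str.isIn "javascript" c then "js"
       else if PySem.Str.isIn "html" c then "html"
       else if PySem.Str.isIn "xml" c then "xml"
       else if PySem.Str.isIn "css" c then "css"
       else if PySem.Str.isIn "json" c then "json"
       else if PySem.Str.isIn "image" c then "media"
       else if PySem.Str.isIn "font" c then "font"
       else "other") := by
  unfold pvCategory pvRules
  by_cases h0 : c == "unknown" <;> simp [h0, pvCategoryLoop] <;> split_ifs <;> simp_all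

theorem pvCategory_mem (c : String) : pvCategory c ∈ pvCategories := by
  rw [pvCategory_cases]; split_ifs <;> simp [pvCategories]

-- a guarded fold is the fold over the filtered list
theorem foldl_ite_eq_foldl_filter {α β : Type} (p : β → Bool) (g : α → β → α) :
    ∀ (l : List β) (init : α),
      l.foldl (fun d e => if p e then g d e else d) init = (l.filter p).foldl g init := by
  intro l
  induction l with
  | nil => intro init; rfl
  | cons e rest ih =>
    intro init
    by_cases h : p e <;> simp [h, ih]

set_option maxHeartbeats 1000000 in
theorem get_content_type_mapping_spec : Claim_equal_get_content_type_mapping := by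
  intro requests ctr _ hpre
  unfold Spec_get_content_type_mapping get_content_type_mapping get_content_type_mapping_alt
  dsimp only
  have hkeys : ((PySem.Dict.mk (ctr.map (fun e => (e.1, e.2)))).keys).Nodup := by
    simpa [PySem.Dict.keys, Function.comp] using hpre
  -- canonical form of A's loop body
  have hbody :
      ctr.foldl (fun mapping webreq_url =>
        let url := webreq_url.1
        match (PySem.Dict.mk (ctr.map (fun e => (e.1, e.2)))).get? url with
        | none => mapping
        | some v =>
          let content_type := PySem.Str.lower v.2.2
          if requests.contains url then
            if content_type == "unknown" || PySem.Str.isIn "octet" content_type then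
              mapping.modify "unknown" [] (· ++ [url])
            else if PySem.Str.isIn "javascript" content_type then
              mapping.modify "js" [] (· ++ [url])
            else if PySem.Str.isIn "html" content_type then
              mapping.modify "html" [] (· ++ [url])
            else if PySem.Str.isIn "xml" content_type then
              mapping.modify "xml" [] (· ++ [url])
            else if PySem.Str.isIn "css" content_type then
              mapping.modify "css" [] (· ++ [url])
            else if PySem.Str.isIn "json" content_type then
              mapping.modify "json" [] (· ++ [url])
            else if PySem.Str.isIn "image" content_type then
              mapping.modify "media" [] (· ++ [url])
            else if PySem.Str.isIn "font" content_type then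
              mapping.modify "font" [] (· ++ [url])
            else
              mapping.modify "other" [] (· ++ [url])
          else mapping) pvInitMapping
      = ctr.foldl (fun mapping e =>
          if requests.contains e.1 then
            mapping.modify (pvCategory (PySem.Str.lower e.2.2.2)) [] (· ++ [e.1])
          else mapping) pvInitMapping := by
    refine PySem.List.foldl_congr_mem _ _ _ _ (fun mapping e he => ?_)
    have hget : (PySem.Dict.mk (ctr.map (fun e => (e.1, e.2)))).get? e.1 = some e.2 := by
      refine PySem.Dict.get?_of_mem_items _ ?_ hkeys
      exact List.mem_map.mpr ⟨e, he, rfl⟩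
    dsimp only
    rw [hget, pvCategory_cases]
    dsimp only
    split_ifs <;> rfl
  rw [hbody]
  rw [show (ctr.foldl (fun (mapping : PySem.Dict String (List String)) e =>
        if requests.contains e.1 then
          mapping.modify (pvCategory (PySem.Str.lower e.2.2.2)) [] (· ++ [e.1])
        else mapping) pvInitMapping)
      = ((ctr.filter (fun e => requests.contains e.1)).foldl
          (fun (mapping : PySem.Dict String (List String)) e =>
            mapping.modify (pvCategory (PySem.Str.lower e.2.2.2)) [] (· ++ [e.1])) pvInitMapping)
    from foldl_ite_eq_foldl_filter _ _ ctr pvInitMapping]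
  -- view the remaining loop as a grouping fold over (category, url) pairs
  set l := ctr.filter (fun e => requests.contains e.1) with hl
  have hfold :
      l.foldl (fun d e => d.modify (pvCategory (PySem.Str.lower e.2.2.2)) [] (· ++ [e.1])) pvInitMapping
      = (l.map (fun e => (pvCategory (PySem.Str.lower e.2.2.2), e.1))).foldl
          (fun d p => d.modify p.1 [] (· ++ [p.2])) pvInitMapping := by
    rw [List.foldl_map]
  rw [hfold]
  set pairs := l.map (fun e => (pvCategory (PySem.Str.lower e.2.2.2), e.1)) with hpairs
  set d := pairs.foldl (fun d p => d.modify p.1 [] (· ++ [p.2])) pvInitMapping with hd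
  -- keys of the result dict are exactly pvCategories
  have hinitkeys : pvInitMapping.keys = pvCategories := by decide
  have hkeysd : d.keys = pvCategories := by
    rw [hd]
    have := PySem.Dict.keys_foldl_modify_key pairs Prod.fst ([] : List String)
      (fun (d : PySem.Dict String (List String)) (p : String × String) => (· ++ [p.2])) pvInitMapping
    rw [this, hinitkeys]
    rw [PySem.Set.update_eq_append_filter]
    have : (PySem.Set.ofList (pairs.map Prod.fst)).filter
        (fun y => !(PySem.Set.contains pvCategories y)) = [] := by
      rw [List.filter_eq_nil_iff]
      intro x hx
      have hx' : x ∈ pairs.map Prod.fst := by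
        simpa [PySem.Set.mem_ofList] using hx
      obtain ⟨p, hp, rfl⟩ := List.mem_map.mp hx'
      obtain ⟨e, he, rfl⟩ := List.mem_map.mp (hpairs ▸ hp)
      have := pvCategory_mem (PySem.Str.lower e.2.2.2)
      simp [PySem.Set.contains, this]
    rw [this, List.append_nil]
  have hnodupd : d.keys.Nodup := by rw [hkeysd]; decide
  -- items of the result dict, bucket by bucket
  rw [PySem.Dict.items_eq_map_keys d hnodupd [], hkeysd]
  refine List.map_congr_left (fun c hc => ?_)
  have hgetD : d.getD c [] =
      pvInitMapping.getD c [] ++ (pairs.filter (fun p => p.1 == c)).map (·.2) := by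
    rw [hd]; exact PySem.Dict.getD_foldl_modify_append pairs pvInitMapping c
  have hinit : pvInitMapping.getD c [] = [] := by
    fin_cases hc <;> decide
  rw [hgetD, hinit, List.nil_append]
  -- both sides are now pure list algebra over l
  simp only [hpairs, List.filter_map, List.map_map]
  rfl
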